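-- pv_equiv track=rewrite | github.com/Saee2803/NLP_Smart_Assistant | services/intelligence_service.py | _filter_alerts_by_context
-- ===== SOURCE A (Python) =====
-- def _filter_alerts_by_context(alerts, context):
--     """Filter alerts based on conversation context."""
--     filtered = alerts
--
--     # Filter by alert type (dataguard, tablespace, etc.)
--     alert_type = context.get("alert_type")
--     if alert_type == "dataguard":
--         dg_keywords = ["standby", "data guard", "dataguard", "apply", "transport", "mrp", "redo", "ora-16"]
--         filtered = [a for a in filtered if
--                    any(kw in (a.get("message") or a.get("msg_text") or "").lower() for kw in dg_keywords) or
--                    any(kw in (a.get("issue_type") or "").lower() for kw in ["standby", "dataguard"])]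
--     elif alert_type == "tablespace":
--         ts_keywords = ["tablespace", "space", "full", "extent", "ora-1654", "ora-1653"]
--         filtered = [a for a in filtered if
--                    any(kw in (a.get("message") or a.get("msg_text") or "").lower() for kw in ts_keywords)]
--
--     # Filter by target if specified - STRICT EXACT MATCHING
--     target = context.get("last_target")
--     if target:
--         target_upper = target.upper()
--         filtered = [a for a in filtered if
--                    (a.get("target_name") or a.get("target") or "").upper() == target_upper]
--
--     # Filter by severity if specified
--     # CRITICAL FIX: Case-insensitive comparison (data has 'Critical', 'Warning')
--     severity = context.get("severity")
--     if severity: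
--         severity_upper = severity.upper()
--         filtered = [a for a in filtered if
--                    (a.get("severity") or a.get("alert_state") or "").upper() == severity_upper]
--
--     return filtered
-- ===== SOURCE B (Python) =====
-- _DG_KEYWORDS = ["standby", "data guard", "dataguard", "apply", "transport", "mrp", "redo", "ora-16"]
-- _TS_KEYWORDS = ["tablespace", "space", "full", "extent", "ora-1654", "ora-1653"]
--
--
-- def _dg_pred(a):
--     text = (a.get("message") or a.get("msg_text") or "").lower()
--     issue = (a.get("issue_type") or "").lower()
--     return any(kw in text for kw in _DG_KEYWORDS) or any(kw in issue for kw in ["standby", "dataguard"])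
--
--
-- def _ts_pred(a):
--     text = (a.get("message") or a.get("msg_text") or "").lower()
--     return any(kw in text for kw in _TS_KEYWORDS)
--
--
-- def _filter_alerts_by_context(alerts, context):
--     """Single pass: build a predicate list from the context, then filter once."""
--     preds = []
--
--     alert_type = context.get("alert_type")
--     if alert_type == "dataguard":
--         preds.append(_dg_pred)
--     elif alert_type == "tablespace":
--         preds.append(_ts_pred)
--
--     target = context.get("last_target")
--     if target:
--         target_upper = target.upper()
--         preds.append(lambda a: (a.get("target_name") or a.get("target") or "").upper() == target_upper)
--
--     severity = context.get("severity")
--     if severity: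
--         severity_upper = severity.upper()
--         preds.append(lambda a: (a.get("severity") or a.get("alert_state") or "").upper() == severity_upper)
--
--     return [a for a in alerts if all(p(a) for p in preds)]
-- ===== Notes on version B (the rewrite author's own statement) =====
-- stated objective: alternative
-- what changed: B builds a list of predicate closures from the context once and filters the alert list in a single pass with all(), instead of A's up-to-three sequential re-filtering passes over intermediate lists.
import Mathlib
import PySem

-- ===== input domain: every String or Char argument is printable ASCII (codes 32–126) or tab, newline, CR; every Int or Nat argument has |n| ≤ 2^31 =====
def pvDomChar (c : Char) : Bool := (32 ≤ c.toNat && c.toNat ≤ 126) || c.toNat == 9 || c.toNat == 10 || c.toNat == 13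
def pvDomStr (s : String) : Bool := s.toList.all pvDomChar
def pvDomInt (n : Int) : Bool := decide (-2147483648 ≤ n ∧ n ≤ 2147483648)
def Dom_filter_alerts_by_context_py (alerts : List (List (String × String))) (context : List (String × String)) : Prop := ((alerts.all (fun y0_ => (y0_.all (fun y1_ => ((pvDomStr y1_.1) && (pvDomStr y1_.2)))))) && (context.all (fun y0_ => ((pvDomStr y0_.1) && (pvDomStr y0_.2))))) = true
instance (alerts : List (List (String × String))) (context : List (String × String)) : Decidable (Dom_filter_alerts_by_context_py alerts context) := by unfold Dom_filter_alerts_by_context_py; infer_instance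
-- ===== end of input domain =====

-- B builds the predicate list from the context once and filters the alerts in ONE pass,
-- replacing A's up-to-three sequential re-filtering passes (alternative decomposition, same results).

-- shared Python-semantics shims (dict.get, `x or y` string coalescing, truthiness of Optional[str])
def pvGet (d : List (String × String)) (k : String) : Option String := (PySem.Dict.mk d).get? k
def pvStrOr (o : Option String) (s : String) : String :=
  match o with
  | some v => if v = "" then s else v
  | none => s
def pvTruthy (o : Option String) : Bool :=
  match o with
  | some v => v ≠ ""
  | none => false

-- ===== PORT A =====  (literal transliteration: sequential comprehension passes)
def filter_alerts_by_context_py (alerts : List (List (String × String))) (context : List (String × String)) : List (List (String × String)) :=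
  let filtered := alerts
  let alert_type := pvGet context "alert_type"
  let filtered :=
    if alert_type = some "dataguard" then
      let dg_keywords := ["standby", "data guard", "dataguard", "apply", "transport", "mrp", "redo", "ora-16"]
      filtered.filter (fun a =>
        dg_keywords.any (fun kw => PySem.Str.isIn kw (PySem.Str.lower (pvStrOr (pvGet a "message") (pvStrOr (pvGet a "msg_text") "")))) ||
        (["standby", "dataguard"].any (fun kw => PySem.Str.isIn kw (PySem.Str.lower (pvStrOr (pvGet a "issue_type") "")))))
    else if alert_type = some "tablespace" then
      let ts_keywords := ["tablespace", "space", "full", "extent", "ora-1654", "ora-1653"]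
      filtered.filter (fun a =>
        ts_keywords.any (fun kw => PySem.Str.isIn kw (PySem.Str.lower (pvStrOr (pvGet a "message") (pvStrOr (pvGet a "msg_text") "")))))
    else filtered
  let target := pvGet context "last_target"
  let filtered :=
    if pvTruthy target then
      let target_upper := PySem.Str.upper (target.getD "")
      filtered.filter (fun a =>
        PySem.Str.upper (pvStrOr (pvGet a "target_name") (pvStrOr (pvGet a "target") "")) = target_upper)
    else filtered
  let severity := pvGet context "severity"
  let filtered :=
    if pvTruthy severity then
      let severity_upper := PySem.Str.upper (severity.getD "")
      filtered.filter (fun a =>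
        PySem.Str.upper (pvStrOr (pvGet a "severity") (pvStrOr (pvGet a "alert_state") "")) = severity_upper)
    else filtered
  filtered

-- ===== PORT B =====  (predicate list built from the context, one filtering pass)
def pvDgPred (a : List (String × String)) : Bool :=
  let text := PySem.Str.lower (pvStrOr (pvGet a "message") (pvStrOr (pvGet a "msg_text") ""))
  let issue := PySem.Str.lower (pvStrOr (pvGet a "issue_type") "")
  (["standby", "data guard", "dataguard", "apply", "transport", "mrp", "redo", "ora-16"].any (fun kw => PySem.Str.isIn kw text)) ||
  (["standby", "dataguard"].any (fun kw => PySem.Str.isIn kw issue))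

def pvTsPred (a : List (String × String)) : Bool :=
  let text := PySem.Str.lower (pvStrOr (pvGet a "message") (pvStrOr (pvGet a "msg_text") ""))
  ["tablespace", "space", "full", "extent", "ora-1654", "ora-1653"].any (fun kw => PySem.Str.isIn kw text)

def pvTargetPred (target_upper : String) (a : List (String × String)) : Bool :=
  PySem.Str.upper (pvStrOr (pvGet a "target_name") (pvStrOr (pvGet a "target") "")) = target_upper

def pvSevPred (severity_upper : String) (a : List (String × String)) : Bool :=
  PySem.Str.upper (pvStrOr (pvGet a "severity") (pvStrOr (pvGet a "alert_state") "")) = severity_upper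

def filter_alerts_by_context_py_alt (alerts : List (List (String × String))) (context : List (String × String)) : List (List (String × String)) :=
  let alert_type := pvGet context "alert_type"
  let target := pvGet context "last_target"
  let severity := pvGet context "severity"
  let preds : List (List (String × String) → Bool) :=
    (if alert_type = some "dataguard" then [pvDgPred]
     else if alert_type = some "tablespace" then [pvTsPred]
     else [])
    ++ (if pvTruthy target then [pvTargetPred (PySem.Str.upper (target.getD ""))] else [])
    ++ (if pvTruthy severity then [pvSevPred (PySem.Str.upper (severity.getD ""))] else [])
  alerts.filter (fun a => preds.all (fun p => p a))

-- ===== PRECONDITION & SPEC =====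
def Spec_filter_alerts_by_context_py (alerts : List (List (String × String))) (context : List (String × String)) (out : List (List (String × String))) : Prop := out = filter_alerts_by_context_py_alt alerts context
instance (alerts : List (List (String × String))) (context : List (String × String)) (out : List (List (String × String))) : Decidable (Spec_filter_alerts_by_context_py alerts context out) := by unfold Spec_filter_alerts_by_context_py; infer_instance

-- ===== CLAIM (what is proved, stated in full; the proofs are below) =====
def Claim_equal_filter_alerts_by_context_py : Prop := ∀ (alerts : List (List (String × String))) (context : List (String × String)), Dom_filter_alerts_by_context_py alerts context → Spec_filter_alerts_by_context_py alerts context (filter_alerts_by_context_py alerts context)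

-- ===== LEMMAS AND PROOFS =====

-- filtering once by the conjunction of a predicate list = applying the filters sequentially
theorem pvFilter_pred_list {α : Type} (ps : List (α → Bool)) (xs : List α) :
    xs.filter (fun a => ps.all (fun p => p a)) = ps.foldl (fun acc p => acc.filter p) xs := by
  induction ps generalizing xs with
  | nil => simp
  | cons p ps ih =>
    simp only [List.all_cons, List.foldl_cons]
    rw [← ih (xs.filter p), List.filter_filter]
    congr 1
    funext a
    exact Bool.and_comm _ _

theorem filter_alerts_by_context_py_eq_alt (alerts : List (List (String × String))) (context : List (String × String)) :
    filter_alerts_by_context_py alerts context = filter_alerts_by_context_py_alt alerts context := by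
  simp only [filter_alerts_by_context_py, filter_alerts_by_context_py_alt, pvFilter_pred_list]
  split_ifs <;>
    (try simp only [List.nil_append, List.cons_append, List.append_nil, List.foldl_cons, List.foldl_nil]) <;>
    first
      | rfl
      | (refine List.filter_congr fun a _ => ?_
         simp [pvDgPred, pvTsPred, pvTargetPred, pvSevPred])

-- ===== VERDICT (by name: the statement is the Claim_ definition above) =====
theorem filter_alerts_by_context_py_spec : Claim_equal_filter_alerts_by_context_py := by
  intro alerts context _
  unfold Spec_filter_alerts_by_context_py
  exact filter_alerts_by_context_py_eq_alt alerts context
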